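-- pv_equiv track=rewrite | github.com/sivvo/malicious-domains | getdomains.py | __bitsquattng
-- ===== SOURCE A (Python) =====
-- def __bitsquattng(search_word):
--     out = []
--     masks = [1, 2, 4, 8, 16, 32, 64, 128]
--
--     for i in range(0, len(search_word)):
--         c = search_word[i]
--         for j in range(0, len(masks)):
--             b = chr(ord(c) ^ masks[j])
--             o = ord(b)
--             if (o >= 48 and o <= 57) or (o >= 97 and o <= 122) or o == 45:
--                 out.append(search_word[:i] + b + search_word[i + 1:])
--     return out
-- ===== SOURCE B (Python) =====
-- def __bitsquattng(search_word):
--     # Replacement table per distinct character (mask order preserved), then one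
--     # prefix/suffix pass over the word instead of per-position re-slicing loops.
--     masks = (1, 2, 4, 8, 16, 32, 64, 128)
--
--     def _reps(c):
--         reps = []
--         for m in masks:
--             o = ord(c) ^ m
--             if 48 <= o <= 57 or 97 <= o <= 122 or o == 45:
--                 reps.append(chr(o))
--         return reps
--
--     table = {c: _reps(c) for c in search_word}
--     out = []
--     prefix = ""
--     rest = search_word
--     while rest:
--         c, rest = rest[0], rest[1:]
--         for r in table[c]:
--             out.append(prefix + r + rest)
--         prefix += c
--     return out
-- ===== Notes on version B (the rewrite author's own statement) =====
-- stated objective: alternative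
-- what changed: B precomputes a dict mapping each distinct character to its ordered list of valid bitsquat replacements (so the mask/validity work is done once per distinct character, not once per position), then emits variants in a single prefix/suffix sweep over the word instead of A's nested index loops with per-mask slicing.
import Mathlib
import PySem

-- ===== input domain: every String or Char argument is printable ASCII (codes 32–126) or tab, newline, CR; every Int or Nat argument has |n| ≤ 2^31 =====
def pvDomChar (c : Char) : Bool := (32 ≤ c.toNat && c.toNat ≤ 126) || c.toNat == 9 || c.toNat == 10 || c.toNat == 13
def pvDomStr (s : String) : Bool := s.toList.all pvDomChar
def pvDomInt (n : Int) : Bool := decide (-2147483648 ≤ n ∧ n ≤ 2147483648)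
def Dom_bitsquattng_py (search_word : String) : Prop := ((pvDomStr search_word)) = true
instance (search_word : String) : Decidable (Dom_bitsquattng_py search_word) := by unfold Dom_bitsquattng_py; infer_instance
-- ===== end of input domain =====

-- B replaces A's nested index loops (8 masks recomputed and validity-checked at every
-- position, with slicing) by a per-distinct-character replacement table plus a single
-- prefix/suffix sweep; equivalence is proved on the printable-ASCII domain.

-- ===== PORT A =====
-- Python string concatenation 'search_word[:i] + b + search_word[i+1:]' is ported exactly
-- on the character list (str concat = char-list concat), repacked with String.ofList.
def bitsquattng_py (search_word : String) : List String :=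
  let cs := search_word.toList
  let masks : List Nat := [1, 2, 4, 8, 16, 32, 64, 128]
  (PySem.List.pyRange 0 (PySem.Str.len search_word) 1).foldl (fun out i =>
    let c := PySem.List.pyGetD cs i ' '
    (PySem.List.pyRange 0 (PySem.List.len masks) 1).foldl (fun out j =>
      let b := Char.ofNat (c.toNat ^^^ PySem.List.pyGetD masks j 0)
      let o := b.toNat
      if (48 ≤ o ∧ o ≤ 57) ∨ (97 ≤ o ∧ o ≤ 122) ∨ o = 45 then
        out ++ [String.ofList (PySem.List.slice cs none (some i) ++
                 b :: PySem.List.slice cs (some (i + 1)) none)]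
      else out) out) []

-- ===== PORT B =====
def pvValid (o : Nat) : Bool := (48 ≤ o && o ≤ 57) || (97 ≤ o && o ≤ 122) || o == 45

def pvReps (c : Char) : List Char :=
  [1, 2, 4, 8, 16, 32, 64, 128].foldl (fun reps m =>
    let o := c.toNat ^^^ m
    if pvValid o then reps ++ [Char.ofNat o] else reps) []

def pvGo (table : PySem.Dict Char (List Char)) :
    List Char → List Char → List String → List String
  | [], _, out => out
  | c :: rest, pre, out =>
      pvGo table rest (pre ++ [c])
        (out ++ (table.getD c []).map (fun r => String.ofList (pre ++ r :: rest)))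

def bitsquattng_py_alt (search_word : String) : List String :=
  let table := search_word.toList.foldl (fun d c => d.insert c (pvReps c)) PySem.Dict.empty
  pvGo table search_word.toList [] []

-- ===== PRECONDITION & SPEC =====
def Spec_bitsquattng_py (search_word : String) (out : List String) : Prop := out = bitsquattng_py_alt search_word
instance (search_word : String) (out : List String) : Decidable (Spec_bitsquattng_py search_word out) := by unfold Spec_bitsquattng_py; infer_instance

-- ===== CLAIM (what is proved, stated in full; the proofs are below) =====
def Claim_equal_bitsquattng_py : Prop := ∀ (search_word : String), Dom_bitsquattng_py search_word → Spec_bitsquattng_py search_word (bitsquattng_py search_word)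

-- ===== LEMMAS AND PROOFS =====

-- the common normal form both ports are reduced to
def pvSpecAux : List Char → List Char → List String
  | _, [] => []
  | pre, c :: rest =>
      (pvReps c).map (fun r => String.ofList (pre ++ r :: rest)) ++ pvSpecAux (pre ++ [c]) rest

lemma pv_toNat_ofNat {n : Nat} (h : n < 55296) : (Char.ofNat n).toNat = n := by
  have hv : Nat.isValidChar n := Or.inl h
  simp [Char.ofNat, Char.ofNatAux, hv, Char.toNat]

lemma pv_table_getD (cs : List Char) (d : PySem.Dict Char (List Char)) (c : Char) :
    (cs.foldl (fun d c => d.insert c (pvReps c)) d).getD c [] =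
      if c ∈ cs then pvReps c else d.getD c [] := by
  induction cs generalizing d with
  | nil => simp
  | cons c0 rest ih =>
      rw [List.foldl_cons, ih]
      rw [PySem.Dict.getD_insert]
      by_cases h : c ∈ rest <;> by_cases h2 : c = c0 <;> simp [h, h2]

lemma pv_go_eq (table : PySem.Dict Char (List Char)) (rest pre : List Char)
    (out : List String) (h : ∀ c ∈ rest, table.getD c [] = pvReps c) :
    pvGo table rest pre out = out ++ pvSpecAux pre rest := by
  induction rest generalizing pre out with
  | nil => simp [pvGo, pvSpecAux]
  | cons c rest ih =>
      rw [pvGo, ih _ _ (fun x hx => h x (List.mem_cons_of_mem _ hx)),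
        h c (List.mem_cons_self)]
      simp [pvSpecAux, List.append_assoc]

lemma pv_alt_eq (s : String) : bitsquattng_py_alt s = pvSpecAux [] s.toList := by
  unfold bitsquattng_py_alt
  rw [pv_go_eq]
  · simp
  · intro c hc
    rw [pv_table_getD]
    simp [hc]

lemma pv_reps_eq_filter (c : Char) :
    pvReps c = (([1, 2, 4, 8, 16, 32, 64, 128] : List Nat).filter
        (fun m => pvValid (c.toNat ^^^ m))).map (fun m => Char.ofNat (c.toNat ^^^ m)) := by
  unfold pvReps
  exact PySem.List.foldl_append_if _ _ _ []

lemma pv_flatMap_eq_aux (cs pre : List Char) :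
    (List.range cs.length).flatMap (fun k =>
        (pvReps (cs.getD k ' ')).map (fun b =>
          String.ofList (pre ++ (cs.take k ++ b :: cs.drop (k + 1))))) =
      pvSpecAux pre cs := by
  induction cs generalizing pre with
  | nil => simp [pvSpecAux]
  | cons c rest ih =>
      rw [show (c :: rest).length = rest.length + 1 from rfl, List.range_succ_eq_map,
        List.flatMap_cons, List.flatMap_map, pvSpecAux, ← ih (pre ++ [c])]
      congr 1
      all_goals simp [List.append_assoc]

lemma pv_cond_eq (x : Nat) (hx : x < 55296) (out : List String) (y : String) :
    (if (48 ≤ (Char.ofNat x).toNat ∧ (Char.ofNat x).toNat ≤ 57) ∨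
        (97 ≤ (Char.ofNat x).toNat ∧ (Char.ofNat x).toNat ≤ 122) ∨
        (Char.ofNat x).toNat = 45 then out ++ [y] else out) =
      (if pvValid x then out ++ [y] else out) := by
  rw [pv_toNat_ofNat hx]
  by_cases h : pvValid x
  · simp only [if_pos h]
    simp [pvValid] at h
    rw [if_pos]
    omega
  · simp only [if_neg h]
    simp [pvValid] at h
    rw [if_neg]
    omega

lemma pv_inner_eq (c : Char) (hc : c.toNat ≤ 126) (F : Char → String) (out : List String) :
    ([1, 2, 4, 8, 16, 32, 64, 128] : List Nat).foldl (fun out m =>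
        let b := Char.ofNat (c.toNat ^^^ m)
        let o := b.toNat
        if (48 ≤ o ∧ o ≤ 57) ∨ (97 ≤ o ∧ o ≤ 122) ∨ o = 45 then out ++ [F b] else out) out
      = out ++ (pvReps c).map F := by
  have hmem : ∀ (o : List String), ∀ m ∈ ([1, 2, 4, 8, 16, 32, 64, 128] : List Nat),
      (fun (out : List String) (m : Nat) =>
        let b := Char.ofNat (c.toNat ^^^ m)
        let o := b.toNat
        if (48 ≤ o ∧ o ≤ 57) ∨ (97 ≤ o ∧ o ≤ 122) ∨ o = 45 then out ++ [F b] else out) o m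
      = (fun (out : List String) (m : Nat) =>
          if pvValid (c.toNat ^^^ m) then out ++ [F (Char.ofNat (c.toNat ^^^ m))] else out) o m := by
    intro o m hm
    have hx : c.toNat ^^^ m < 55296 := by
      have h1 : c.toNat < 2 ^ 8 := by omega
      have h2 : m < 2 ^ 8 := by fin_cases hm <;> norm_num
      have := Nat.xor_lt_two_pow h1 h2
      omega
    exact pv_cond_eq _ hx o (F _)
  rw [PySem.List.foldl_congr_mem _ _ _ _ hmem,
    PySem.List.foldl_append_if (fun m => pvValid (c.toNat ^^^ m))
      (fun m => F (Char.ofNat (c.toNat ^^^ m)))]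
  rw [pv_reps_eq_filter, List.map_map]
  rfl

set_option maxHeartbeats 1000000 in
lemma pv_A_eq (s : String) (h : ∀ c ∈ s.toList, c.toNat ≤ 126) :
    bitsquattng_py s = pvSpecAux [] s.toList := by
  simp only [bitsquattng_py]
  rw [show PySem.Str.len s = ((s.toList.length : Nat) : Int) from by
        simp [PySem.Str.len],
    PySem.List.pyRange_zero_natCast, List.foldl_map]
  have hstep : ∀ (out : List String), ∀ k ∈ List.range s.toList.length,
      (PySem.List.pyRange 0 (PySem.List.len ([1, 2, 4, 8, 16, 32, 64, 128] : List Nat))).foldl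
        (fun out j =>
          let b := Char.ofNat ((PySem.List.pyGetD s.toList (↑k) ' ').toNat ^^^
            PySem.List.pyGetD ([1, 2, 4, 8, 16, 32, 64, 128] : List Nat) j 0)
          let o := b.toNat
          if (48 ≤ o ∧ o ≤ 57) ∨ (97 ≤ o ∧ o ≤ 122) ∨ o = 45 then
            out ++ [String.ofList (PySem.List.slice s.toList none (some ↑k) ++
              b :: PySem.List.slice s.toList (some (↑k + 1)) none)]
          else out) out
      = out ++ (pvReps (s.toList.getD k ' ')).map (fun b =>
          String.ofList (s.toList.take k ++ b :: s.toList.drop (k + 1))) := by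
    intro out k hk
    simp only [List.mem_range] at hk
    have hcmem : s.toList.getD k ' ' ∈ s.toList := by
      rw [s.toList.getD_eq_getElem ' ' hk]
      exact List.getElem_mem hk
    have hc : (s.toList.getD k ' ').toNat ≤ 126 := h _ hcmem
    rw [PySem.List.foldl_pyRange_zero_pyGetD ([1, 2, 4, 8, 16, 32, 64, 128] : List Nat) 0
      (fun out m =>
        let b := Char.ofNat ((PySem.List.pyGetD s.toList (↑k) ' ').toNat ^^^ m)
        let o := b.toNat
        if (48 ≤ o ∧ o ≤ 57) ∨ (97 ≤ o ∧ o ≤ 122) ∨ o = 45 then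
          out ++ [String.ofList (PySem.List.slice s.toList none (some ↑k) ++
            b :: PySem.List.slice s.toList (some (↑k + 1)) none)]
        else out) out]
    rw [show PySem.List.pyGetD s.toList (↑k) ' ' = s.toList.getD k ' ' from
        PySem.List.pyGetD_natCast s.toList k ' ']
    rw [PySem.List.slice_to_natCast,
      show ((k : Int) + 1) = ((k + 1 : Nat) : Int) from by push_cast; ring,
      PySem.List.slice_from_natCast]
    exact pv_inner_eq _ hc
      (fun b => String.ofList (List.take k s.toList ++ b :: List.drop (k + 1) s.toList)) out
  rw [PySem.List.foldl_congr_mem _ _ _ _ hstep, PySem.List.foldl_append_eq_flatMap]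
  have := pv_flatMap_eq_aux s.toList []
  simpa using this

-- ===== VERDICT (by name: the statement is the Claim_ definition above) =====
theorem bitsquattng_py_spec : Claim_equal_bitsquattng_py := by
  intro s hdom
  unfold Spec_bitsquattng_py
  rw [pv_alt_eq, pv_A_eq]
  intro c hc
  have := List.all_eq_true.mp hdom c hc
  simp [pvDomChar] at this
  omega
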